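-- pv_equiv track=rewrite | github.com/grandir66/dadude2.0 | dadude/app/services/hp_aruba_collector.py | _parse_lldp
-- ===== SOURCE A (Python) =====
-- from typing import Dict, Any, Optional, List, Tuple
--
-- def _parse_lldp(output: str) -> Dict[str, Dict[str, str]]:
--     """Parse 'show lldp info remote-device detail'"""
--     lldp_info = {}
--     current_port = None
--
--     for line in output.splitlines():
--         line = line.strip()
--
--         if not line:
--             continue
--
--         # Local Port : XX
--         if line.startswith("Local Port"):
--             parts = line.split(":", 1)
--             if len(parts) == 2:
--                 current_port = parts[1].strip()
--                 lldp_info[current_port] = {}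
--             continue
--
--         # Se siamo in un blocco porta, parse key: value
--         if current_port and ":" in line:
--             key, value = line.split(":", 1)
--             key = key.strip().lower().replace(" ", "_")
--             value = value.strip()
--             lldp_info[current_port][key] = value
--
--     return lldp_info
-- ===== SOURCE B (Python) =====
-- def _header_port(line):
--     """Port name if line is a 'Local Port : X' header, else None."""
--     if line.startswith("Local Port") and ":" in line:
--         return line.split(":", 1)[1].strip()
--     return None
--
--
-- def _segments(lines):
--     """Partition stripped lines into (port, body-lines) segments, dropping the preamble."""
--     segs = []
--     i = 0
--     n = len(lines)
--     while i < n: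
--         p = _header_port(lines[i])
--         i += 1
--         if p is None:
--             continue
--         j = i
--         while j < n and _header_port(lines[j]) is None:
--             j += 1
--         segs.append((p, lines[i:j]))
--         i = j
--     return segs
--
--
-- def _parse_body(port, body):
--     d = {}
--     if not port:
--         return d
--     for l in body:
--         if l and ":" in l:
--             k, v = l.split(":", 1)
--             d[k.strip().lower().replace(" ", "_")] = v.strip()
--     return d
--
--
-- def _parse_lldp(output):
--     lines = [l.strip() for l in output.splitlines()]
--     info = {}
--     for port, body in _segments(lines):
--         info[port] = _parse_body(port, body)
--     return info
-- ===== Notes on version B (the rewrite author's own statement) =====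
-- stated objective: simpler
-- what changed: B replaces A's single stateful line-loop carrying a current_port register with a two-stage decomposition: first partition the stripped lines into (port, body) segments at header lines, then build each port's key/value dict independently and assign the dicts in segment order.
import Mathlib
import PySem

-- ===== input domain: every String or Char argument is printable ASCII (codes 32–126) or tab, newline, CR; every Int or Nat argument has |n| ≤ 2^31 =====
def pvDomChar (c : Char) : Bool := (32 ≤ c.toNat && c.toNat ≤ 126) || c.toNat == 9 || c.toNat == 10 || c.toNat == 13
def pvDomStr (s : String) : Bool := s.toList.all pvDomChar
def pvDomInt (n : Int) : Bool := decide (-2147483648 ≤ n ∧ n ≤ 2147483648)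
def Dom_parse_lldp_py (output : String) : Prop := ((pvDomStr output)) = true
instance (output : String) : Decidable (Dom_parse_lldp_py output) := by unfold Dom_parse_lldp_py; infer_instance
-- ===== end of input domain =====

-- B re-decomposes A's single stateful line-loop into header segmentation plus an
-- independent per-segment key/value parse (objective: simpler decomposition, same cost).

-- ===== PORT A =====
-- A's loop body on one (already-stripped) line; state = (lldp_info, current_port).
-- Python's `lldp_info[current_port][key] = value` is ported as Dict.modify (current_port
-- is always a present key when the branch fires, so modify = the Python item assignment).
def pvAStep (st : PySem.Dict String (PySem.Dict String String) × Option String)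
    (line : String) : PySem.Dict String (PySem.Dict String String) × Option String :=
  if line == "" then st
  else if PySem.Str.startswith line "Local Port" then
    match PySem.Str.splitMax? line ":" 1 with
    | some [_, p1] =>
        let cp := PySem.Str.strip p1
        (st.1.insert cp PySem.Dict.empty, some cp)
    | _ => st            -- len(parts) != 2: continue
  else
    match st.2 with
    | some cp =>
        if cp != "" && PySem.Str.isIn ":" line then
          match PySem.Str.splitMax? line ":" 1 with
          | some [k, v] =>
              (st.1.modify cp PySem.Dict.empty
                 (fun m => m.insert
                     (PySem.Str.replace (PySem.Str.lower (PySem.Str.strip k)) " " "_")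
                     (PySem.Str.strip v)),
               st.2)
          | _ => st      -- unreachable: ":" in line gives exactly 2 parts
        else st
    | none => st

def parse_lldp_py (output : String) : List (String × List (String × String)) :=
  let fin := (PySem.Str.splitlines output).foldl
    (fun st line0 => pvAStep st (PySem.Str.strip line0))
    (PySem.Dict.empty, none)
  fin.1.items.map (fun p => (p.1, p.2.items))

-- ===== PORT B =====
def pvHeaderPort (line : String) : Option String :=
  if PySem.Str.startswith line "Local Port" then
    match PySem.Str.splitMax? line ":" 1 with
    | some [_, p1] => some (PySem.Str.strip p1)
    | _ => none
  else none

-- the while-loop of Source B's _segments as structural recursion (inner while = takeWhile/dropWhile)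
def pvSegments : List String → List (String × List String)
  | [] => []
  | l :: rest =>
    match pvHeaderPort l with
    | none => pvSegments rest
    | some p =>
        (p, rest.takeWhile (fun x => (pvHeaderPort x).isNone)) ::
          pvSegments (rest.dropWhile (fun x => (pvHeaderPort x).isNone))
termination_by ls => ls.length
decreasing_by
  · simp
  · have := List.length_dropWhile_le (fun x => (pvHeaderPort x).isNone) rest
    simp; omega

def pvBodyStep (d : PySem.Dict String String) (l : String) : PySem.Dict String String :=
  if l != "" && PySem.Str.isIn ":" l then
    match PySem.Str.splitMax? l ":" 1 with
    | some [k, v] =>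
        d.insert (PySem.Str.replace (PySem.Str.lower (PySem.Str.strip k)) " " "_")
          (PySem.Str.strip v)
    | _ => d           -- unreachable: ":" in l gives exactly 2 parts
  else d

def pvParseBody (port : String) (body : List String) : PySem.Dict String String :=
  if port == "" then PySem.Dict.empty
  else body.foldl pvBodyStep PySem.Dict.empty

def parse_lldp_py_alt (output : String) : List (String × List (String × String)) :=
  let lines := (PySem.Str.splitlines output).map PySem.Str.strip
  let info := (pvSegments lines).foldl
    (fun d pb => d.insert pb.1 (pvParseBody pb.1 pb.2)) PySem.Dict.empty
  info.items.map (fun p => (p.1, p.2.items))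

-- ===== PRECONDITION & SPEC =====
def Spec_parse_lldp_py (output : String) (out : List (String × List (String × String))) : Prop := out = parse_lldp_py_alt output
instance (output : String) (out : List (String × List (String × String))) : Decidable (Spec_parse_lldp_py output out) := by unfold Spec_parse_lldp_py; infer_instance

-- ===== CLAIM (what is proved, stated in full; the proofs are below) =====
def Claim_equal_parse_lldp_py : Prop := ∀ (output : String), Dom_parse_lldp_py output → Spec_parse_lldp_py output (parse_lldp_py output)

-- ===== LEMMAS AND PROOFS =====

-- abbreviations for the proofs
def pvH (x : String) : Bool := (pvHeaderPort x).isNone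

def pvBFold (segs : List (String × List String))
    (d : PySem.Dict String (PySem.Dict String String)) :
    PySem.Dict String (PySem.Dict String String) :=
  segs.foldl (fun d pb => d.insert pb.1 (pvParseBody pb.1 pb.2)) d

-- A's body update, written against the (D.insert p acc) representation of the state
def pvBodyStep' (p : String) (acc : PySem.Dict String String) (l : String) :
    PySem.Dict String String :=
  if p == "" then acc else pvBodyStep acc l

def pvBodyAcc (p : String) (acc : PySem.Dict String String) (body : List String) :
    PySem.Dict String String :=
  if p == "" then acc else body.foldl pvBodyStep acc

theorem pvStep_header {l q : String} (h : pvHeaderPort l = some q)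
    (st : PySem.Dict String (PySem.Dict String String) × Option String) :
    pvAStep st l = (st.1.insert q PySem.Dict.empty, some q) := by
  by_cases hl : l = ""
  · subst hl
    have hsw : PySem.Str.startswith "" "Local Port" = false := by decide
    unfold pvHeaderPort at h; rw [hsw] at h; simp at h
  · have hbe : (l == "") = false := by simp [hl]
    rcases hsw : PySem.Str.startswith l "Local Port" with _ | _
    · unfold pvHeaderPort at h; rw [hsw] at h; simp at h
    · rcases hsp : PySem.Str.splitMax? l ":" 1 with _ | ⟨_ | ⟨a, _ | ⟨b, _ | t⟩⟩⟩ <;>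
        unfold pvHeaderPort at h <;> rw [hsw] at h <;> rw [hsp] at h <;> simp at h
      subst h
      simp only [pvAStep, hbe, hsw, hsp, Bool.false_eq_true, reduceIte]

theorem pvStep_nonheader {l : String} (h : pvHeaderPort l = none)
    (D : PySem.Dict String (PySem.Dict String String)) (p : String)
    (acc : PySem.Dict String String) :
    pvAStep (D.insert p acc, some p) l = (D.insert p (pvBodyStep' p acc l), some p) := by
  by_cases hl : l = ""
  · subst hl
    simp only [pvAStep, pvBodyStep', pvBodyStep, reduceIte, beq_self_eq_true, bne_self_eq_false,
      Bool.false_and]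
    split <;> rfl
  · have hbe : (l == "") = false := by simp [hl]
    have hbne : (l != "") = true := by simp [hl]
    rcases hsw : PySem.Str.startswith l "Local Port" with _ | _
    · -- not a "Local Port" line: A's key:value branch against B's pvBodyStep
      by_cases hp : p = ""
      · have hpbe : (p == "") = true := by simp [hp]
        simp only [pvAStep, pvBodyStep', hbe, hsw, hp, bne_self_eq_false, Bool.false_and,
          Bool.false_eq_true, beq_self_eq_true, reduceIte]
      · have hpbe : (p == "") = false := by simp [hp]
        have hpbne : (p != "") = true := by simp [hp]
        rcases hin : PySem.Str.isIn ":" l with _ | _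
        · simp only [pvAStep, pvBodyStep', pvBodyStep, hbe, hbne, hsw, hpbe, hpbne, hin,
            Bool.false_eq_true, Bool.and_false, reduceIte]
        · rcases hsp : PySem.Str.splitMax? l ":" 1 with _ | ⟨_ | ⟨a, _ | ⟨b, _ | t⟩⟩⟩ <;>
            simp only [pvAStep, pvBodyStep', pvBodyStep, hbe, hbne, hsw, hpbe, hpbne, hin, hsp,
              Bool.false_eq_true, Bool.and_true, reduceIte,
              PySem.Dict.modify, PySem.Dict.getD_insert_self, PySem.Dict.insert_insert_self]
    · -- "Local Port" line that is NOT a header: its split has no second part; both sides skip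
      rcases hsp : PySem.Str.splitMax? l ":" 1 with _ | ⟨_ | ⟨a, _ | ⟨b, _ | t⟩⟩⟩ <;>
        unfold pvHeaderPort at h <;> rw [hsw] at h <;> rw [hsp] at h <;> simp at h <;>
        simp only [pvAStep, pvBodyStep', pvBodyStep, hbe, hbne, hsw, hsp,
          Bool.false_eq_true, Bool.true_and, ite_self]

theorem pvStep_none {l : String} (h : pvHeaderPort l = none)
    (D : PySem.Dict String (PySem.Dict String String)) :
    pvAStep (D, none) l = (D, none) := by
  by_cases hl : l = ""
  · subst hl; simp only [pvAStep, beq_self_eq_true, reduceIte]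
  · have hbe : (l == "") = false := by simp [hl]
    rcases hsw : PySem.Str.startswith l "Local Port" with _ | _
    · simp only [pvAStep, hbe, hsw, Bool.false_eq_true, reduceIte]
    · rcases hsp : PySem.Str.splitMax? l ":" 1 with _ | ⟨_ | ⟨a, _ | ⟨b, _ | t⟩⟩⟩ <;>
        unfold pvHeaderPort at h <;> rw [hsw] at h <;> rw [hsp] at h <;> simp at h <;>
        simp only [pvAStep, hbe, hsw, hsp, Bool.false_eq_true, reduceIte]

theorem pvBodyAcc_nil (p : String) (acc : PySem.Dict String String) :
    pvBodyAcc p acc [] = acc := by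
  unfold pvBodyAcc; split <;> rfl

theorem pvBodyAcc_cons (p : String) (acc : PySem.Dict String String) (l : String)
    (body : List String) :
    pvBodyAcc p acc (l :: body) = pvBodyAcc p (pvBodyStep' p acc l) body := by
  unfold pvBodyAcc pvBodyStep'
  by_cases hp : p = "" <;> simp [hp]

theorem pvBodyAcc_empty_eq_parseBody (p : String) (body : List String) :
    pvBodyAcc p PySem.Dict.empty body = pvParseBody p body := by
  unfold pvBodyAcc pvParseBody
  split <;> rfl

theorem pvMain_some : ∀ (ls : List String) (D : PySem.Dict String (PySem.Dict String String))
    (p : String) (acc : PySem.Dict String String),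
    (ls.foldl pvAStep (D.insert p acc, some p)).1
      = pvBFold (pvSegments (ls.dropWhile pvH)) (D.insert p (pvBodyAcc p acc (ls.takeWhile pvH)))
  | [], D, p, acc => by
      simp [pvBFold, pvSegments, pvBodyAcc_nil]
  | l :: rest, D, p, acc => by
      rcases hh : pvHeaderPort l with _ | q
      · have hH : pvH l = true := by simp [pvH, hh]
        rw [List.foldl_cons, pvStep_nonheader hh,
          List.dropWhile_cons_of_pos hH, List.takeWhile_cons_of_pos hH,
          pvMain_some rest D p (pvBodyStep' p acc l), pvBodyAcc_cons]
      · have hH : pvH l = false := by simp [pvH, hh]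
        rw [List.foldl_cons, pvStep_header hh,
          List.dropWhile_cons_of_neg (by simp [hH]), List.takeWhile_cons_of_neg (by simp [hH]),
          pvBodyAcc_nil]
        show (rest.foldl pvAStep ((D.insert p acc).insert q PySem.Dict.empty, some q)).1 = _
        rw [pvMain_some rest (D.insert p acc) q PySem.Dict.empty,
          pvBodyAcc_empty_eq_parseBody]
        simp only [pvSegments, hh, pvBFold, List.foldl_cons]
        rfl
  termination_by ls => ls.length

theorem pvMain_none : ∀ (ls : List String) (D : PySem.Dict String (PySem.Dict String String)),
    (ls.foldl pvAStep (D, none)).1 = pvBFold (pvSegments ls) D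
  | [], D => by simp [pvBFold, pvSegments]
  | l :: rest, D => by
      rcases hh : pvHeaderPort l with _ | q
      · rw [List.foldl_cons, pvStep_none hh, pvMain_none rest D]
        simp only [pvSegments, hh]
      · rw [List.foldl_cons, pvStep_header hh]
        show (rest.foldl pvAStep (D.insert q PySem.Dict.empty, some q)).1 = _
        rw [pvMain_some rest D q PySem.Dict.empty, pvBodyAcc_empty_eq_parseBody]
        simp only [pvSegments, hh, pvBFold, List.foldl_cons]
        rfl

-- ===== VERDICT (by name: the statement is the Claim_ definition above) =====
theorem parse_lldp_py_spec : Claim_equal_parse_lldp_py := by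
  intro output _
  show parse_lldp_py output = parse_lldp_py_alt output
  simp only [parse_lldp_py, parse_lldp_py_alt]
  rw [← List.foldl_map (f := PySem.Str.strip) (g := pvAStep),
    pvMain_none ((PySem.Str.splitlines output).map PySem.Str.strip) PySem.Dict.empty]
  rfl
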